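-- pv_equiv track=rewrite | github.com/mariami57/Problem-Solving | leetcode/max_consecutive_ones.py | findMaxConsecutiveOnes
-- ===== SOURCE A (Python) =====
-- from typing import List
--
-- def findMaxConsecutiveOnes(nums: List[int]) -> int:
--     left = 0
--     max_length = 0
--
--     for right in range(len(nums)):
--         if nums[right] == 0:
--             left = right + 1
--         else:
--             max_length = max(max_length, right - left + 1)
--
--     return max_length
-- ===== SOURCE B (Python) =====
-- from typing import List
--
-- def findMaxConsecutiveOnes(nums: List[int]) -> int:
--     # Build the lengths of all maximal runs of non-zero elements first,
--     # then take the largest (0 when there is no run).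
--     runs = []
--     cur = 0
--     for x in nums:
--         if x != 0:
--             cur += 1
--         else:
--             if cur > 0:
--                 runs.append(cur)
--             cur = 0
--     if cur > 0:
--         runs.append(cur)
--     return max(runs, default=0)
-- ===== Notes on version B (the rewrite author's own statement) =====
-- stated objective: faster
-- what changed: B first materialises the list of maximal run lengths of non-zero elements in one comparison-light pass and then takes max(runs, default=0), instead of A's per-index loop over range(len(nums)) with a sliding left-boundary index and an inline max() call at every non-zero element.
import Mathlib
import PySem

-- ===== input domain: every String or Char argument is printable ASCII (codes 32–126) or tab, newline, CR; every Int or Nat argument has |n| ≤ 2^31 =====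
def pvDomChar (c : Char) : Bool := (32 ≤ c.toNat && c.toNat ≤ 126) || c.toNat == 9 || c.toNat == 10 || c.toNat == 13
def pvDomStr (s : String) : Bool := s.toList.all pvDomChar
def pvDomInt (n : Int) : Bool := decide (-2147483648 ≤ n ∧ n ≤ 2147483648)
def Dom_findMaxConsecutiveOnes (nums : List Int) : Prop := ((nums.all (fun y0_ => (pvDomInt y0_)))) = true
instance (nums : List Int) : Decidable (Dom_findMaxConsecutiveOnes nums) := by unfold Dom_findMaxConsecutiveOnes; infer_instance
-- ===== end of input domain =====

-- B replaces A's sliding left-boundary scan by materialising the maximal run lengths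
-- and taking max(runs, default=0); objective: alternative decomposition, same O(n) cost.

-- ===== PORT A =====
-- A's for-right-in-range loop over state (left, max_length); nums[right] is always in
-- range (0 ≤ right < len), so pyGetD with any default is exact here.
def findMaxConsecutiveOnes (nums : List Int) : Int :=
  let s := (PySem.List.pyRange 0 (PySem.List.len nums) 1).foldl
    (fun (s : Int × Int) right =>
      if PySem.List.pyGetD nums right 0 == 0 then (right + 1, s.2)
      else (s.1, max s.2 (right - s.1 + 1)))
    (0, 0)
  s.2

-- ===== PORT B =====
-- Source B's loop: state (runs, cur); cur counts the current run, a finished positive run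
-- is appended to runs.
def pvRunsOfOnes (nums : List Int) : List Int × Int :=
  nums.foldl
    (fun (s : List Int × Int) x =>
      if x ≠ 0 then (s.1, s.2 + 1)
      else (if s.2 > 0 then s.1 ++ [s.2] else s.1, 0))
    ([], 0)

-- max(runs, default=0) is PySem.List.maxD with the identity key.
def findMaxConsecutiveOnes_alt (nums : List Int) : Int :=
  let s := pvRunsOfOnes nums
  let runs := if s.2 > 0 then s.1 ++ [s.2] else s.1
  PySem.List.maxD runs (fun y => y) 0

-- ===== PRECONDITION & SPEC =====
def Spec_findMaxConsecutiveOnes (nums : List Int) (out : Int) : Prop := out = findMaxConsecutiveOnes_alt nums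
instance (nums : List Int) (out : Int) : Decidable (Spec_findMaxConsecutiveOnes nums out) := by unfold Spec_findMaxConsecutiveOnes; infer_instance

-- ===== CLAIM (what is proved, stated in full; the proofs are below) =====
def Claim_equal_findMaxConsecutiveOnes : Prop := ∀ (nums : List Int), Dom_findMaxConsecutiveOnes nums → Spec_findMaxConsecutiveOnes nums (findMaxConsecutiveOnes nums)

-- ===== LEMMAS AND PROOFS =====

-- pulling an extra argument out of the initial value of a running max
lemma pv_foldl_max_init (t : List Int) : ∀ (a b : Int), t.foldl max (max a b) = max (t.foldl max a) b := by
  induction t with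
  | nil => intro a b; rfl
  | cons c t ih =>
      intro a b
      simp only [List.foldl_cons]
      rw [show max (max a b) c = max (max a c) b by omega, ih]

-- invariant tying A's loop state to B's: after the whole scan,
-- left = len - cur, max_length = max (running max of runs) cur; cur ≥ 0; runs positive.
lemma pv_invariant : ∀ (nums : List Int),
    ((PySem.List.pyRange 0 (PySem.List.len nums) 1).foldl
      (fun (s : Int × Int) right =>
        if PySem.List.pyGetD nums right 0 == 0 then (right + 1, s.2)
        else (s.1, max s.2 (right - s.1 + 1)))
      (0, 0))
    = ((nums.length : Int) - (pvRunsOfOnes nums).2,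
       max ((pvRunsOfOnes nums).1.foldl max 0) (pvRunsOfOnes nums).2)
    ∧ 0 ≤ (pvRunsOfOnes nums).2
    ∧ ∀ y ∈ (pvRunsOfOnes nums).1, 0 < y := by
  intro nums
  induction nums using List.reverseRecOn with
  | nil => simp [pvRunsOfOnes, PySem.List.pyRange, PySem.List.len]
  | append_singleton xs x ih =>
      obtain ⟨hA, hc, hpos⟩ := ih
      have hlen : PySem.List.len (xs ++ [x]) = (xs.length : Int) + 1 := by
        simp [PySem.List.len_eq]
      have hrange : PySem.List.pyRange 0 ((xs.length : Int) + 1) 1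
          = PySem.List.pyRange 0 (xs.length : Int) 1 ++ [(xs.length : Int)] := by
        exact PySem.List.pyRange_one_succ_right (by positivity)
      -- the fold over the first len xs indices reads only xs
      have hcongr : (PySem.List.pyRange 0 (PySem.List.len xs) 1).foldl
          (fun (s : Int × Int) right =>
            if PySem.List.pyGetD (xs ++ [x]) right 0 == 0 then (right + 1, s.2)
            else (s.1, max s.2 (right - s.1 + 1)))
          (0, 0)
          = (PySem.List.pyRange 0 (PySem.List.len xs) 1).foldl
          (fun (s : Int × Int) right =>
            if PySem.List.pyGetD xs right 0 == 0 then (right + 1, s.2)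
            else (s.1, max s.2 (right - s.1 + 1)))
          (0, 0) := by
        apply PySem.List.foldl_congr_mem
        intro acc r hr
        have hr' := (PySem.List.mem_pyRange_one).mp hr
        simp [PySem.List.len_eq] at hr'
        have h0 : (0:Int) ≤ r := hr'.1
        have h1 : r < (xs.length : Int) := hr'.2
        rw [PySem.List.pyGetD_eq_getElem (xs ++ [x]) 0 h0 (by simpa using by omega),
            PySem.List.pyGetD_eq_getElem xs 0 h0 (by exact_mod_cast h1),
            List.getElem_append_left]
      have hlast : PySem.List.pyGetD (xs ++ [x]) (xs.length : Int) 0 = x := by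
        rw [PySem.List.pyGetD_eq_getElem (xs ++ [x]) 0 (by positivity) (by simp)]
        simp
      -- B's state on xs ++ [x]
      have hB : pvRunsOfOnes (xs ++ [x])
          = (if x ≠ 0 then ((pvRunsOfOnes xs).1, (pvRunsOfOnes xs).2 + 1)
             else (if (pvRunsOfOnes xs).2 > 0 then (pvRunsOfOnes xs).1 ++ [(pvRunsOfOnes xs).2]
                   else (pvRunsOfOnes xs).1, 0)) := by
        simp [pvRunsOfOnes]
      rw [hlen, hrange]
      simp only [List.foldl_append, List.foldl_cons, List.foldl_nil]
      rw [show PySem.List.pyRange 0 ((xs.length : Int)) 1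
            = PySem.List.pyRange 0 (PySem.List.len xs) 1 by simp [PySem.List.len_eq],
          hcongr]
      rw [show PySem.List.pyRange 0 (PySem.List.len xs) 1
            = PySem.List.pyRange 0 ((xs.length : Int)) 1 by simp [PySem.List.len_eq]] at hA ⊢
      rw [hA, hlast, hB]
      have hR := (PySem.List.le_foldl_max (pvRunsOfOnes xs).1 0).1
      by_cases hx : x = 0
      · -- zero: A resets left, B closes the run
        simp only [hx, beq_self_eq_true, if_true, ne_eq, not_true_eq_false, if_false]
        by_cases hcur : (pvRunsOfOnes xs).2 > 0
        · simp only [if_pos hcur, List.foldl_append, List.foldl_cons, List.foldl_nil,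
            List.length_append, List.length_cons, List.length_nil, Prod.mk.injEq]
          refine ⟨⟨by push_cast; ring, by omega⟩, le_refl 0, ?_⟩
          intro y hy
          rcases List.mem_append.mp hy with h | h
          · exact hpos y h
          · simp at h; omega
        · have hcur0 : (pvRunsOfOnes xs).2 = 0 := by omega
          simp only [if_neg hcur, List.length_append, List.length_cons, List.length_nil,
            Prod.mk.injEq]
          exact ⟨⟨by push_cast; ring, by omega⟩, le_refl 0, hpos⟩
      · -- non-zero: A extends the window, B extends the run
        have hbeq : (x == 0) = false := by simpa using hx
        simp only [ne_eq, hx, not_false_eq_true, if_true, hbeq, Bool.false_eq_true, if_false,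
          List.length_append, List.length_cons, List.length_nil, Prod.mk.injEq]
        refine ⟨⟨by push_cast; ring, by omega⟩, by omega, hpos⟩

-- max(runs, default=0) on a cons list is the running max
lemma pv_maxD_cons (r : Int) (t : List Int) :
    PySem.List.maxD (r :: t) (fun y => y) 0 = t.foldl max r := by
  simp [PySem.List.maxD, PySem.List.max?_id_cons]

-- ===== VERDICT (by name: the statement is the Claim_ definition above) =====
theorem findMaxConsecutiveOnes_spec : Claim_equal_findMaxConsecutiveOnes := by
  intro nums _
  unfold Spec_findMaxConsecutiveOnes findMaxConsecutiveOnes findMaxConsecutiveOnes_alt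
  obtain ⟨hA, hc, hpos⟩ := pv_invariant nums
  rw [hA]
  rcases hP : pvRunsOfOnes nums with ⟨rs, cur⟩
  rw [hP] at hc hpos
  simp only []
  have hmaxD_nil : PySem.List.maxD ([] : List Int) (fun y => y) 0 = 0 := by
    simp [PySem.List.maxD, PySem.List.max?]
  by_cases hcp : cur > 0
  · simp only [if_pos hcp]
    cases rs with
    | nil =>
        rw [List.nil_append, pv_maxD_cons]
        simp only [List.foldl_nil]
        omega
    | cons r t =>
        rw [show (r :: t) ++ [cur] = r :: (t ++ [cur]) by simp, pv_maxD_cons,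
            List.foldl_append]
        simp only [List.foldl_cons, List.foldl_nil]
        rw [show max (0:Int) r = max r 0 by omega, pv_foldl_max_init]
        omega
  · simp only [if_neg hcp]
    cases rs with
    | nil =>
        simp only [List.foldl_nil, hmaxD_nil]
        omega
    | cons r t =>
        rw [pv_maxD_cons]
        have hr : 0 < r := hpos r (List.mem_cons_self ..)
        have hle := (PySem.List.le_foldl_max t r).1
        rw [show List.foldl max 0 (r :: t) = t.foldl max (max r 0) by
              simp only [List.foldl_cons]; rw [max_comm],
            pv_foldl_max_init]
        omega
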